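-- pv_equiv track=rewrite | github.com/gdiggit6/Daily-Agenda2 | tuples.py | get_weight_stats
-- ===== SOURCE A (Python) =====
-- def get_weight_stats ( wa, wb ) :
-- 	loss, even, gain = 0, 0, 0
-- 	for i in zip ( wa, wb ) :
-- 		if i [ 0 ] > i [ 1 ] :
-- 			loss += 1
-- 		elif i [ 0 ] < i [ 1 ] :
-- 			gain += 1
-- 		else :
-- 			even += 1
-- 	return str ( loss ) + ' lost weight, ' + str ( even ) + ' remained the same, ' + str ( gain ) + ' gained weight.'
-- ===== SOURCE B (Python) =====
-- def get_weight_stats(wa, wb):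
--     loss = sum(1 for a, b in zip(wa, wb) if a > b)
--     gain = sum(1 for a, b in zip(wa, wb) if a < b)
--     even = min(len(wa), len(wb)) - loss - gain
--     return str(loss) + ' lost weight, ' + str(even) + ' remained the same, ' + str(gain) + ' gained weight.'
-- ===== Notes on version B (the rewrite author's own statement) =====
-- stated objective: idiomatic
-- what changed: Replaces the single branching loop with three-accumulator state by independent filtered counts over the zipped pairs, deriving the 'even' count by subtraction from min(len(wa), len(wb)).
import Mathlib
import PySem

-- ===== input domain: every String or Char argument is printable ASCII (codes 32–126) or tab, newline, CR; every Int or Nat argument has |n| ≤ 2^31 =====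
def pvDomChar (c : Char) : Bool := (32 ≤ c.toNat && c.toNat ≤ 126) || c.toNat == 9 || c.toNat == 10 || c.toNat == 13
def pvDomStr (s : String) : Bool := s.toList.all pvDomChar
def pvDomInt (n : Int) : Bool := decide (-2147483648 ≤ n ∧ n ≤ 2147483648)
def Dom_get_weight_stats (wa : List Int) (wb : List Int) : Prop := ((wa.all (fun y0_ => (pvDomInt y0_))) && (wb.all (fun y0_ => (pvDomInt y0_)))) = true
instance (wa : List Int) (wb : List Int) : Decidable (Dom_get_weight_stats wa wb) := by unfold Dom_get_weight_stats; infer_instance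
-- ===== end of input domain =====

-- B replaces A's single branching loop with independent filtered counts (even derived by subtraction); same cost, more idiomatic.


-- ===== PORT A =====
def get_weight_stats (wa : List Int) (wb : List Int) : String :=
  let s := (List.zip wa wb).foldl
    (fun (s : Int × Int × Int) i =>
      if i.1 > i.2 then (s.1 + 1, s.2.1, s.2.2)
      else if i.1 < i.2 then (s.1, s.2.1, s.2.2 + 1)
      else (s.1, s.2.1 + 1, s.2.2)) (0, 0, 0)
  PySem.Int.toStr s.1 ++ " lost weight, " ++ PySem.Int.toStr s.2.1 ++
    " remained the same, " ++ PySem.Int.toStr s.2.2 ++ " gained weight."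

-- ===== PORT B =====
def get_weight_stats_alt (wa : List Int) (wb : List Int) : String :=
  let loss : Int := ((List.zip wa wb).countP (fun i => decide (i.1 > i.2)) : Nat)
  let gain : Int := ((List.zip wa wb).countP (fun i => decide (i.1 < i.2)) : Nat)
  let even : Int := (min wa.length wb.length : Nat) - loss - gain
  PySem.Int.toStr loss ++ " lost weight, " ++ PySem.Int.toStr even ++
    " remained the same, " ++ PySem.Int.toStr gain ++ " gained weight."

-- ===== PRECONDITION & SPEC =====
def Spec_get_weight_stats (wa : List Int) (wb : List Int) (out : String) : Prop := out = get_weight_stats_alt wa wb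
instance (wa : List Int) (wb : List Int) (out : String) : Decidable (Spec_get_weight_stats wa wb out) := by unfold Spec_get_weight_stats; infer_instance

-- ===== CLAIM (what is proved, stated in full; the proofs are below) =====
def Claim_equal_get_weight_stats : Prop := ∀ (wa : List Int) (wb : List Int), Dom_get_weight_stats wa wb → Spec_get_weight_stats wa wb (get_weight_stats wa wb)

-- ===== LEMMAS AND PROOFS =====

-- ===== VERDICT (by name: the statement is the Claim_ definition above) =====

theorem pv_fold_eq (l : List (Int × Int)) (a b c : Int) :
    l.foldl
      (fun (s : Int × Int × Int) i =>
        if i.1 > i.2 then (s.1 + 1, s.2.1, s.2.2)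
        else if i.1 < i.2 then (s.1, s.2.1, s.2.2 + 1)
        else (s.1, s.2.1 + 1, s.2.2)) (a, b, c) =
      (a + l.countP (fun i => decide (i.1 > i.2)),
       b + ((l.length : Int) - l.countP (fun i => decide (i.1 > i.2)) - l.countP (fun i => decide (i.1 < i.2))),
       c + l.countP (fun i => decide (i.1 < i.2))) := by
  induction l generalizing a b c with
  | nil => simp
  | cons h t ih =>
    simp only [List.foldl_cons, List.countP_cons, List.length_cons]
    by_cases h1 : h.1 > h.2
    · have h2 : ¬ h.1 < h.2 := by omega
      rw [if_pos h1, ih]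
      simp only [h1, h2, decide_true, decide_false, Prod.mk.injEq]
      refine ⟨by push_cast; ring, by push_cast; ring, by push_cast; ring⟩
    · rw [if_neg h1]
      by_cases h2 : h.1 < h.2
      · rw [if_pos h2, ih]
        simp only [gt_iff_lt, h1, h2, decide_true, decide_false, Prod.mk.injEq]
        refine ⟨by push_cast; ring, by push_cast; ring, by push_cast; ring⟩
      · rw [if_neg h2, ih]
        simp only [gt_iff_lt, h1, h2, decide_true, decide_false, Prod.mk.injEq]
        refine ⟨by push_cast; ring, by push_cast; ring, by push_cast; ring⟩

theorem get_weight_stats_spec : Claim_equal_get_weight_stats := by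
  intro wa wb _
  unfold Spec_get_weight_stats get_weight_stats get_weight_stats_alt
  rw [pv_fold_eq]
  simp [List.length_zip]
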